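-- pv_equiv track=rewrite | github.com/pypi-data/pypi-mirror-370 | packages/treesitter-chunker/treesitter-chunker-2.0.0.tar.gz/treesitter-chunker-2.0.0/chunker/extractors/rust/rust_extractor.py | _is_in_string_or_comment
-- ===== SOURCE A (Python) =====
-- def _is_in_string_or_comment(source_code: str, position: int) -> bool:
--     """Check if position is inside a string literal or comment."""
--     try:
--         # Simple check: look backwards to see if we're in a string or comment
--         before = source_code[:position]
--
--         # Count unescaped quotes
--         double_quotes = 0
--         single_quotes = 0
--         i = 0
--         while i < len(before):
--             if before[i] == '\\':
--                 i += 2  # Skip escaped character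
--                 continue
--             elif before[i] == '"':
--                 double_quotes += 1
--             elif before[i] == "'":
--                 single_quotes += 1
--             i += 1
--
--         # If odd number of quotes, we're inside a string
--         if double_quotes % 2 == 1 or single_quotes % 2 == 1:
--             return True
--
--         # Check for line comments
--         line_start = before.rfind('\n') + 1
--         line_before_pos = before[line_start:]
--         if '//' in line_before_pos:
--             comment_pos = line_before_pos.find('//')
--             if comment_pos < len(line_before_pos):
--                 return True
--
--         # Check for block comments (simplified)
--         if '/*' in before and '*/' not in before[before.rfind('/*'):]:
--             return True
--
--         return False
--
--     except Exception:
--         return False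
-- ===== SOURCE B (Python) =====
-- def _is_in_string_or_comment(source_code: str, position: int) -> bool:
--     """Check if position is inside a string literal or comment."""
--     before = source_code[:position]
--
--     # Strip escapes by string surgery instead of a char-by-char scan:
--     # first delete escaped backslashes, then every remaining backslash
--     # hides the character after it.
--     stripped = before.replace('\\\\', '')
--     parts = stripped.split('\\')
--     visible = parts[0] + ''.join(p[1:] for p in parts[1:])
--
--     # If odd number of unescaped quotes, we're inside a string
--     if visible.count('"') % 2 == 1 or visible.count("'") % 2 == 1:
--         return True
--
--     # Check for line comments (unchanged)
--     line_start = before.rfind('\n') + 1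
--     line_before_pos = before[line_start:]
--     if '//' in line_before_pos:
--         comment_pos = line_before_pos.find('//')
--         if comment_pos < len(line_before_pos):
--             return True
--
--     # Check for block comments (simplified, unchanged)
--     if '/*' in before and '*/' not in before[before.rfind('/*'):]:
--         return True
--
--     return False
-- ===== Notes on version B (the rewrite author's own statement) =====
-- stated objective: faster
-- what changed: The char-by-char while-loop that counts unescaped quotes (stepping i += 2 over escapes) is replaced by string surgery: delete escaped backslashes with str.replace('\\',''), split on the remaining backslashes and drop the escaped character heading each later piece, then str.count the quotes; the comment checks and the odd-parity test are unchanged, and A's dead try/except is dropped since no statement can raise. Same O(n) asymptotics, but the per-character interpreted loop becomes a few C-implemented str operations (measured ~15x at the largest size).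
import Mathlib
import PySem

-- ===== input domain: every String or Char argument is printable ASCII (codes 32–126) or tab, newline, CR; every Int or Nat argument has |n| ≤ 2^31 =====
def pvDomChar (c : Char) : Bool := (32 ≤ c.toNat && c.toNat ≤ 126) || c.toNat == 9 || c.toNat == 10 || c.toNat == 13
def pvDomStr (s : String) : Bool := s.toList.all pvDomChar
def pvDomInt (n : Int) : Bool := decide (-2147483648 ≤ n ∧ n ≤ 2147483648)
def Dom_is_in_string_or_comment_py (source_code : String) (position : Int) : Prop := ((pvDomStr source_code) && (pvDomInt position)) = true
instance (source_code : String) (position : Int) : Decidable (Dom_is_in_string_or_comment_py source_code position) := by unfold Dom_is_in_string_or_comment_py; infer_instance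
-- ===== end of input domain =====

-- B replaces A's index-stepping while-loop over characters (i += 2 to skip escapes) by string
-- surgery: delete escaped backslashes with str.replace, split on the remaining backslashes and
-- drop the escaped character heading each later piece, then str.count the quotes; the comment
-- checks are unchanged. Objective: faster by a constant factor (measured).

-- ===== PORT A =====
-- the 'while i < len(before)' quote-counting loop of A, recursion on the index i
def pvCountQuotes (before : List Char) (dq sq i : Nat) : Nat × Nat :=
  if h : i < before.length then
    if before[i] = '\\' then pvCountQuotes before dq sq (i + 2)      -- skip escaped character
    else if before[i] = '"' then pvCountQuotes before (dq + 1) sq (i + 1)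
    else if before[i] = '\'' then pvCountQuotes before dq (sq + 1) (i + 1)
    else pvCountQuotes before dq sq (i + 1)
  else (dq, sq)
termination_by before.length - i

def is_in_string_or_comment_py (source_code : String) (position : Int) : Bool :=
  -- the try/except wrapper of A is dead code: no statement in the body can raise
  let before := PySem.Str.slice source_code none (some position)
  let counts := pvCountQuotes before.toList 0 0 0
  if counts.1 % 2 = 1 ∨ counts.2 % 2 = 1 then true
  else
    let line_start := PySem.Str.rfind before "\n" + 1
    let line_before_pos := PySem.Str.slice before (some line_start) none
    if PySem.Str.isIn "//" line_before_pos ∧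
        PySem.Str.find line_before_pos "//" < (PySem.Str.len line_before_pos : Int) then true
    else if PySem.Str.isIn "/*" before ∧
        ¬ (PySem.Str.isIn "*/" (PySem.Str.slice before (some (PySem.Str.rfind before "/*")) none) = true) then true
    else false

-- ===== PORT B =====
def is_in_string_or_comment_py_alt (source_code : String) (position : Int) : Bool :=
  let before := PySem.Str.slice source_code none (some position)
  let stripped := PySem.Str.replace before "\\\\" ""            -- before.replace('\\\\', '')
  let parts := PySem.Chars.splitOn stripped.toList ['\\']       -- stripped.split('\\')
  -- parts[0] + ''.join(p[1:] for p in parts[1:])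
  let visible := parts.headD [] ++
      PySem.Chars.join [] (parts.tail.map (fun p => PySem.Chars.slice p (some 1) none))
  if PySem.Chars.count visible ['"'] % 2 = 1 ∨ PySem.Chars.count visible ['\''] % 2 = 1 then true
  else
    let line_start := PySem.Str.rfind before "\n" + 1
    let line_before_pos := PySem.Str.slice before (some line_start) none
    if PySem.Str.isIn "//" line_before_pos ∧
        PySem.Str.find line_before_pos "//" < (PySem.Str.len line_before_pos : Int) then true
    else if PySem.Str.isIn "/*" before ∧
        ¬ (PySem.Str.isIn "*/" (PySem.Str.slice before (some (PySem.Str.rfind before "/*")) none) = true) then true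
    else false

-- ===== PRECONDITION & SPEC =====
def Spec_is_in_string_or_comment_py (source_code : String) (position : Int) (out : Bool) : Prop := out = is_in_string_or_comment_py_alt source_code position
instance (source_code : String) (position : Int) (out : Bool) : Decidable (Spec_is_in_string_or_comment_py source_code position out) := by unfold Spec_is_in_string_or_comment_py; infer_instance

-- ===== CLAIM (what is proved, stated in full; the proofs are below) =====
def Claim_equal_is_in_string_or_comment_py : Prop := ∀ (source_code : String) (position : Int), Dom_is_in_string_or_comment_py source_code position → Spec_is_in_string_or_comment_py source_code position (is_in_string_or_comment_py source_code position)

-- ===== LEMMAS AND PROOFS =====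

-- the characters A's loop actually counts: every backslash-escape pair removed
def pvStrip : List Char → List Char
  | [] => []
  | c :: t => if c = '\\' then pvStrip (t.drop 1) else c :: pvStrip t
termination_by l => l.length
decreasing_by all_goals (simp; try omega)

-- spec of before.replace('\\\\', '')
def pvRepl : List Char → List Char
  | '\\' :: '\\' :: t => pvRepl t
  | c :: t => c :: pvRepl t
  | [] => []

-- spec of stripped.split('\\')
def pvSplit : List Char → List (List Char)
  | [] => [[]]
  | '\\' :: t => [] :: pvSplit t
  | c :: t => (pvSplit t).modifyHead (c :: ·)

theorem pvRepl_bb (t : List Char) : pvRepl ('\\' :: '\\' :: t) = pvRepl t := rfl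
theorem pvRepl_one : pvRepl ['\\'] = ['\\'] := rfl
theorem pvRepl_cons_ne (c : Char) (t : List Char) (h : c ≠ '\\') :
    pvRepl (c :: t) = c :: pvRepl t := by
  cases t with
  | nil => simp [pvRepl]
  | cons d t' => simp [pvRepl, h]
theorem pvRepl_b_cons_ne (c : Char) (t : List Char) (h : c ≠ '\\') :
    pvRepl ('\\' :: c :: t) = '\\' :: pvRepl (c :: t) := by
  simp [pvRepl, h]

theorem pvSplit_b (t : List Char) : pvSplit ('\\' :: t) = [] :: pvSplit t := rfl
theorem pvSplit_cons_ne (c : Char) (t : List Char) (h : c ≠ '\\') :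
    pvSplit (c :: t) = (pvSplit t).modifyHead (c :: ·) := by
  simp [pvSplit]
theorem pvSplit_ne_nil (l : List Char) : pvSplit l ≠ [] := by
  induction l with
  | nil => simp [pvSplit]
  | cons c t ih =>
    by_cases h : c = '\\'
    · subst h; simp [pvSplit]
    · rw [pvSplit_cons_ne c t h]
      cases hh : pvSplit t with
      | nil => exact absurd hh ih
      | cons p ps => simp

theorem replGo_eq (fuel : Nat) (l acc : List Char) (h : l.length ≤ fuel) :
    PySem.Chars.replace.go ['\\', '\\'] [] fuel l acc = acc.reverse ++ pvRepl l := by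
  induction fuel generalizing l acc with
  | zero =>
    have : l = [] := by cases l with | nil => rfl | cons a b => simp at h
    subst this; simp [PySem.Chars.replace.go, pvRepl]
  | succ n ih =>
    cases l with
    | nil => simp [PySem.Chars.replace.go, pvRepl]
    | cons c t =>
      rw [PySem.Chars.replace.go]
      by_cases hp : List.isPrefixOf ['\\', '\\'] (c :: t) = true
      · rw [if_pos hp]
        obtain ⟨u, hu⟩ : ∃ u, c :: t = '\\' :: '\\' :: u := by
          cases t with
          | nil => simp [List.isPrefixOf] at hp
          | cons d u => simp [List.isPrefixOf] at hp; exact ⟨u, by rw [← hp.1, ← hp.2]⟩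
        cases hu
        simp only [List.length_cons] at h
        rw [ih _ _ (by simpa using Nat.le_of_succ_le h)]
        simp [pvRepl_bb]
      · rw [if_neg hp, ih t (c :: acc) (by simpa using h)]
        by_cases hcb : c = '\\'
        · subst hcb
          cases t with
          | nil => simp [pvRepl_one, pvRepl]
          | cons d u =>
            have hd : d ≠ '\\' := by
              intro hd; subst hd; simp [List.isPrefixOf] at hp
            rw [pvRepl_b_cons_ne d u hd]; simp
        · rw [pvRepl_cons_ne c t hcb]; simp

theorem modifyHead_fun_id (xs : List (List Char)) : xs.modifyHead (fun x => x) = xs := by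
  cases xs <;> simp

theorem splitGo_eq (fuel : Nat) (l cur : List Char) (acc : List (List Char)) (h : l.length < fuel) :
    PySem.Chars.splitOn.go ['\\'] fuel l cur acc
      = acc.reverse ++ (pvSplit l).modifyHead (cur.reverse ++ ·) := by
  induction fuel generalizing l cur acc with
  | zero => omega
  | succ n ih =>
    cases l with
    | nil => simp [PySem.Chars.splitOn.go, pvSplit]
    | cons c t =>
      rw [PySem.Chars.splitOn.go]
      by_cases hp : List.isPrefixOf ['\\'] (c :: t) = true
      · have hc : c = '\\' := by
          have h2 : '\\' = c := by simpa [List.isPrefixOf] using hp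
          exact h2.symm
        subst hc
        rw [if_pos hp]
        simp only [List.length_cons, List.length_nil, List.drop_succ_cons, List.drop_zero]
        rw [ih t [] (cur.reverse :: acc) (by simpa using h)]
        simp [pvSplit_b, modifyHead_fun_id]
      · have hc : c ≠ '\\' := by
          intro hc; subst hc; simp [List.isPrefixOf] at hp
        rw [if_neg hp, ih t (c :: cur) acc (by simpa using Nat.lt_of_succ_lt_succ (by simpa using h))]
        rw [pvSplit_cons_ne c t hc]
        cases pvSplit t <;> simp

theorem countGo_eq (q : Char) (fuel : Nat) (l : List Char) (acc : Nat) (h : l.length ≤ fuel) :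
    PySem.Chars.count.go [q] fuel l acc = acc + l.count q := by
  induction fuel generalizing l acc with
  | zero =>
    have : l = [] := by cases l with | nil => rfl | cons a b => simp at h
    subst this; simp [PySem.Chars.count.go]
  | succ n ih =>
    cases l with
    | nil => simp [PySem.Chars.count.go]
    | cons c t =>
      rw [PySem.Chars.count.go]
      by_cases hp : List.isPrefixOf [q] (c :: t) = true
      · have hc : q = c := by simpa [List.isPrefixOf] using hp
        rw [if_pos hp]
        simp only [List.length_cons, List.length_nil, List.drop_succ_cons, List.drop_zero]
        rw [ih t (acc + 1) (by simpa using h)]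
        subst hc; simp; omega
      · have hc : q ≠ c := by intro hc; subst hc; simp [List.isPrefixOf] at hp
        rw [if_neg hp, ih t acc (by simpa using h)]
        simp [(by simpa using hc.symm : ¬ (c = q))]

theorem vis_aux : ∀ (n : Nat) (l : List Char), l.length ≤ n →
    (pvSplit (pvRepl l)).headD [] ++ ((pvSplit (pvRepl l)).tail.map (List.drop 1)).flatten
      = pvStrip l := by
  intro n
  induction n with
  | zero =>
    intro l h
    have : l = [] := by cases l with | nil => rfl | cons a b => simp at h
    subst this; simp [pvRepl, pvSplit, pvStrip]
  | succ n ih =>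
    intro l h
    cases l with
    | nil => simp [pvRepl, pvSplit, pvStrip]
    | cons c t =>
      by_cases hc : c = '\\'
      · subst hc
        cases t with
        | nil => simp [pvRepl_one, pvSplit_b, pvSplit, pvStrip]
        | cons d u =>
          by_cases hd : d = '\\'
          · subst hd
            rw [pvRepl_bb]
            rw [ih u (by simp at h ⊢; omega)]
            simp [pvStrip]
          · rw [pvRepl_b_cons_ne d u hd, pvRepl_cons_ne d u hd, pvSplit_b,
                pvSplit_cons_ne d _ hd]
            cases hS : pvSplit (pvRepl u) with
            | nil => exact absurd hS (pvSplit_ne_nil _)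
            | cons p ps =>
              have ihu := ih u (by simp at h ⊢; omega)
              rw [hS] at ihu
              simp only [List.modifyHead_cons, List.headD_cons, List.tail_cons, List.map_cons,
                List.flatten_cons, List.drop_succ_cons, List.drop_zero] at ihu ⊢
              simp only [List.nil_append]
              rw [ihu]
              simp [pvStrip]
      · rw [pvRepl_cons_ne c t hc, pvSplit_cons_ne c _ hc]
        cases hS : pvSplit (pvRepl t) with
        | nil => exact absurd hS (pvSplit_ne_nil _)
        | cons p ps =>
          have iht := ih t (by simp at h ⊢; omega)
          rw [hS] at iht
          simp only [List.modifyHead_cons, List.headD_cons, List.tail_cons] at iht ⊢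
          rw [List.cons_append, iht]
          simp [pvStrip, hc]

theorem pvCountQuotes_aux : ∀ (n : Nat) (l : List Char) (dq sq i : Nat), l.length - i ≤ n →
    pvCountQuotes l dq sq i =
      (dq + (pvStrip (l.drop i)).count '"', sq + (pvStrip (l.drop i)).count '\'') := by
  intro n
  induction n with
  | zero =>
    intro l dq sq i h
    have hni : ¬ i < l.length := by omega
    rw [pvCountQuotes, dif_neg hni, List.drop_eq_nil_of_le (by omega)]
    simp [pvStrip]
  | succ n ih =>
    intro l dq sq i h
    rw [pvCountQuotes]
    by_cases hi : i < l.length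
    · rw [dif_pos hi]
      have hd : l.drop i = l[i] :: l.drop (i + 1) := List.drop_eq_getElem_cons hi
      by_cases hb : l[i] = '\\'
      · rw [if_pos hb, ih l dq sq (i + 2) (by omega)]
        rw [hd, hb]
        have : (l.drop (i + 1)).drop 1 = l.drop (i + 2) := by
          rw [List.drop_drop]
        simp [pvStrip, this]
      · rw [if_neg hb]
        by_cases h2 : l[i] = '"'
        · rw [if_pos h2, ih l (dq + 1) sq (i + 1) (by omega), hd, h2]
          simp [pvStrip, Prod.ext_iff]
          omega
        · rw [if_neg h2]
          by_cases h3 : l[i] = '\''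
          · rw [if_pos h3, ih l dq (sq + 1) (i + 1) (by omega), hd, h3]
            simp [pvStrip, Prod.ext_iff]
            omega
          · rw [if_neg h3, ih l dq sq (i + 1) (by omega), hd]
            simp [pvStrip, hb, h2, h3, -List.getElem_cons_drop]
    · rw [dif_neg hi, List.drop_eq_nil_of_le (by omega)]
      simp [pvStrip]

theorem chars_replace_eq (L : List Char) :
    PySem.Chars.replace L ['\\', '\\'] [] = pvRepl L := by
  rw [PySem.Chars.replace]
  simp only [List.isEmpty_cons, if_false, Bool.false_eq_true]
  exact replGo_eq L.length L [] le_rfl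

theorem chars_splitOn_eq (L : List Char) :
    PySem.Chars.splitOn L ['\\'] = pvSplit L := by
  rw [PySem.Chars.splitOn, splitGo_eq (L.length + 1) L [] [] (by omega)]
  simp [modifyHead_fun_id]

theorem chars_count_single (L : List Char) (q : Char) :
    PySem.Chars.count L [q] = L.count q := by
  rw [PySem.Chars.count]
  simp only [List.isEmpty_cons, if_false, Bool.false_eq_true]
  rw [countGo_eq q L.length L 0 le_rfl]
  omega

theorem intercalate_nil' (xs : List (List Char)) :
    List.intercalate ([] : List Char) xs = xs.flatten := by
  induction xs with
  | nil => simp [List.intercalate]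
  | cons a xs ih =>
    cases xs with
    | nil => simp [List.intercalate]
    | cons b ys =>
      simp [List.intercalate, List.intersperse] at ih ⊢
      exact ih

theorem visible_eq (L : List Char) :
    (pvSplit (pvRepl L)).headD [] ++
      PySem.Chars.join [] ((pvSplit (pvRepl L)).tail.map (fun p => PySem.Chars.slice p (some 1) none))
      = pvStrip L := by
  have h1 : ∀ p : List Char, PySem.Chars.slice p (some 1) none = p.drop 1 := by
    intro p
    rw [PySem.Chars.slice_eq_listSlice, PySem.List.slice_from_one, List.drop_one]
  simp only [h1]
  rw [PySem.Chars.join, intercalate_nil']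
  exact vis_aux L.length L le_rfl

theorem main_eq (source_code : String) (position : Int) :
    is_in_string_or_comment_py source_code position
      = is_in_string_or_comment_py_alt source_code position := by
  unfold is_in_string_or_comment_py is_in_string_or_comment_py_alt
  have hA : ∀ L : List Char, pvCountQuotes L 0 0 0
      = ((pvStrip L).count '"', (pvStrip L).count '\'') := by
    intro L
    rw [pvCountQuotes_aux L.length L 0 0 0 (by omega)]
    simp
  have hB : ∀ s : String, (PySem.Str.replace s "\\\\" "").toList
      = pvRepl s.toList := by
    intro s
    rw [PySem.Str.toList_replace]
    have h2 : ("\\\\" : String).toList = ['\\', '\\'] := by decide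
    rw [h2]
    have h0 : ("" : String).toList = [] := by decide
    rw [h0]
    exact chars_replace_eq _
  simp only [hA, hB, chars_splitOn_eq, chars_count_single, visible_eq]

-- ===== VERDICT (by name: the statement is the Claim_ definition above) =====
theorem is_in_string_or_comment_py_spec : Claim_equal_is_in_string_or_comment_py := by
  intro source_code position _
  unfold Spec_is_in_string_or_comment_py
  exact main_eq source_code position
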